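-- pv_equiv track=rewrite | github.com/fkd-streamlit/quantum-shintaku | app03.py | _split_multi_text
-- ===== SOURCE A (Python) =====
-- from typing import Dict, List, Tuple, Optional
--
-- def _split_multi_text(cell_value: str) -> List[str]:
--     if cell_value is None:
--         return []
--     s = str(cell_value).strip()
--     if not s or s.lower() in ("nan", "none"):
--         return []
--     s = s.replace("\r\n", "\n").replace("\r", "\n")
--     parts: List[str] = []
--     for chunk in s.split("\n\n"):
--         parts.extend([p.strip() for p in chunk.split("\n") if p.strip()])
--     return [p for p in parts if p]
-- ===== SOURCE B (Python) =====
-- def _split_multi_text(cell_value):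
--     if cell_value is None:
--         return []
--     s = str(cell_value).strip()
--     if not s or s.lower() in ("nan", "none"):
--         return []
--     s = s.replace("\r\n", "\n").replace("\r", "\n")
--     out = []
--     cur = []
--     for ch in s:
--         if ch == "\n":
--             t = "".join(cur).strip()
--             if t:
--                 out.append(t)
--             cur = []
--         else:
--             cur.append(ch)
--     t = "".join(cur).strip()
--     if t:
--         out.append(t)
--     return out
-- ===== Notes on version B (the rewrite author's own statement) =====
-- stated objective: alternative
-- what changed: B replaces A's nested paragraph-then-line splitting (outer split on '\n\n', inner split per chunk with extend, final re-filter) by a single character-by-character scan with a current-line accumulator that flushes a stripped non-empty line at each newline.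
import Mathlib
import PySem

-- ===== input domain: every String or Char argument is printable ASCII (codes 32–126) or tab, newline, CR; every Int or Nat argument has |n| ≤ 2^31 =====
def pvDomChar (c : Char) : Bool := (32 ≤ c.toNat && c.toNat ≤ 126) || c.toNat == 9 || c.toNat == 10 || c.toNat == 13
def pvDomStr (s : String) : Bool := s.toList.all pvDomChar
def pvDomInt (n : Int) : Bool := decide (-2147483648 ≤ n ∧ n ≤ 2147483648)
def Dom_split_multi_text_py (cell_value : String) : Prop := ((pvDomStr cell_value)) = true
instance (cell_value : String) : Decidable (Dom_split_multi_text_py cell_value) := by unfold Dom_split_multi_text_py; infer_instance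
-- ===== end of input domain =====

-- B replaces A's nested paragraph-then-line splitting by one character scan with a line
-- accumulator; the value is identical, so equality is proved with no Pre_.
-- The parameter is typed str, so Python's 'cell_value is None' branch and 'str(cell_value)'
-- conversion are identities and are not represented.

-- ===== PORT A =====
-- Python's s.split(sep) for a nonempty literal sep
def pySplitStr (s sep : String) : List String :=
  (PySem.Chars.splitOn s.toList sep.toList).map String.ofList

def split_multi_text_py (cell_value : String) : List String :=
  let s := PySem.Str.strip cell_value
  if s = "" ∨ PySem.Str.lower s = "nan" ∨ PySem.Str.lower s = "none" then []
  else
    let s2 := PySem.Str.replace (PySem.Str.replace s "\r\n" "\n") "\r" "\n"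
    let parts := (pySplitStr s2 "\n\n").foldl
      (fun acc chunk =>
        acc ++ ((pySplitStr chunk "\n").filter
                  (fun p => PySem.Str.strip p ≠ "")).map PySem.Str.strip) []
    parts.filter (fun p => p ≠ "")

-- ===== PORT B =====
-- the character loop of Source B: cur is the pending line, out the emitted lines;
-- at '\n' (and at the end) the stripped pending line is appended when non-empty
def pvScan : List Char → List Char → List String → List String
  | [], cur, out =>
      let t := PySem.Chars.strip cur
      if t = [] then out else out ++ [String.ofList t]
  | ch :: rest, cur, out =>
      if ch = '\n' then
        let t := PySem.Chars.strip cur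
        pvScan rest [] (if t = [] then out else out ++ [String.ofList t])
      else
        pvScan rest (cur ++ [ch]) out

def split_multi_text_py_alt (cell_value : String) : List String :=
  let s := PySem.Str.strip cell_value
  if s = "" ∨ PySem.Str.lower s = "nan" ∨ PySem.Str.lower s = "none" then []
  else
    let s2 := PySem.Str.replace (PySem.Str.replace s "\r\n" "\n") "\r" "\n"
    pvScan s2.toList [] []

-- ===== PRECONDITION & SPEC =====
def Spec_split_multi_text_py (cell_value : String) (out : List String) : Prop := out = split_multi_text_py_alt cell_value
instance (cell_value : String) (out : List String) : Decidable (Spec_split_multi_text_py cell_value out) := by unfold Spec_split_multi_text_py; infer_instance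

-- ===== CLAIM (what is proved, stated in full; the proofs are below) =====
def Claim_equal_split_multi_text_py : Prop := ∀ (cell_value : String), Dom_split_multi_text_py cell_value → Spec_split_multi_text_py cell_value (split_multi_text_py cell_value)

-- ===== LEMMAS AND PROOFS =====

-- fuel-free structural version of PySem.Chars.splitOn (nonempty separator)
def splitRec (sep : List Char) : List Char → List (List Char)
  | [] => [[]]
  | c :: t =>
    if sep.isPrefixOf (c :: t) ∧ sep ≠ [] then
      [] :: splitRec sep ((c :: t).drop sep.length)
    else
      (splitRec sep t).modifyHead (c :: ·)
termination_by l => l.length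
decreasing_by
  · simp only [List.length_drop, List.length_cons]
    have : 1 ≤ sep.length := by
      rcases sep with _ | ⟨a, r⟩
      · simp_all
      · simp
    omega
  · simp

theorem splitRec_ne_nil (sep l) : splitRec sep l ≠ [] := by
  fun_induction splitRec sep l with
  | case1 => simp
  | case2 => simp
  | case3 c t _ ih =>
    rcases h : splitRec sep t with _ | ⟨a, r⟩
    · exact absurd h ih
    · simp

theorem go_eq_splitRec (sep : List Char) (hsep : sep ≠ []) :
    ∀ (fuel : Nat) (l cur : List Char) (acc : List (List Char)), l.length ≤ fuel →
      PySem.Chars.splitOn.go sep fuel l cur acc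
        = acc.reverse ++ (splitRec sep l).modifyHead (cur.reverse ++ ·) := by
  intro fuel
  induction fuel with
  | zero =>
    intro l cur acc hl
    have : l = [] := by
      cases l
      · rfl
      · simp at hl
    subst this
    rw [PySem.Chars.splitOn.go.eq_def]
    simp [splitRec]
  | succ fuel ih =>
    intro l cur acc hl
    cases l with
    | nil =>
      rw [PySem.Chars.splitOn.go.eq_def]
      simp [splitRec]
    | cons c t =>
      rw [PySem.Chars.splitOn.go.eq_def]
      simp only []
      by_cases hp : sep.isPrefixOf (c :: t) = true
      · have hlen : 1 ≤ sep.length := by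
          rcases sep with _ | ⟨a, r⟩
          · simp_all
          · simp
        have hdrop : ((c :: t).drop sep.length).length ≤ fuel := by
          simp only [List.length_drop, List.length_cons]
          simp only [List.length_cons] at hl
          omega
        rw [if_pos hp, ih _ _ _ hdrop]
        have hsr : splitRec sep (c :: t) = [] :: splitRec sep ((c :: t).drop sep.length) := by
          rw [splitRec]
          rw [if_pos ⟨hp, hsep⟩]
        rw [hsr]
        rcases h : splitRec sep ((c :: t).drop sep.length) with _ | ⟨a, r⟩
        · exact absurd h (splitRec_ne_nil _ _)
        · simp
      · rw [if_neg hp, ih _ _ _ (by simp only [List.length_cons] at hl; omega)]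
        have hsr : splitRec sep (c :: t) = (splitRec sep t).modifyHead (c :: ·) := by
          rw [splitRec]
          rw [if_neg (by simp [hp])]
        rw [hsr]
        rcases h : splitRec sep t with _ | ⟨a, r⟩
        · exact absurd h (splitRec_ne_nil _ _)
        · simp

theorem splitOn_eq_splitRec (l sep : List Char) (hsep : sep ≠ []) :
    PySem.Chars.splitOn l sep = splitRec sep l := by
  unfold PySem.Chars.splitOn
  rw [go_eq_splitRec sep hsep _ _ _ _ (by omega)]
  rcases h : splitRec sep l with _ | ⟨a, r⟩
  · exact absurd h (splitRec_ne_nil _ _)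
  · simp

-- join the per-paragraph line lists, one empty line between consecutive paragraphs
def joinLines : List (List Char) → List (List Char)
  | [] => []
  | [x] => splitRec ['\n'] x
  | x :: y :: r => splitRec ['\n'] x ++ [] :: joinLines (y :: r)

theorem splitRec_nil_eq (sep : List Char) : splitRec sep [] = [[]] := by
  rw [splitRec]

theorem splitRec_n_cons_n (t : List Char) :
    splitRec ['\n'] ('\n' :: t) = [] :: splitRec ['\n'] t := by
  rw [splitRec]
  rw [if_pos ⟨by simp [List.isPrefixOf], by simp⟩]
  simp

theorem splitRec_n_cons_ne (c : Char) (t : List Char) (hc : c ≠ '\n') :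
    splitRec ['\n'] (c :: t) = (splitRec ['\n'] t).modifyHead (c :: ·) := by
  rw [splitRec]
  rw [if_neg (by rintro ⟨hp, -⟩; simp [List.isPrefixOf] at hp; exact hc hp.symm)]

theorem splitRec_nn_cons_nn (t : List Char) :
    splitRec ['\n', '\n'] ('\n' :: '\n' :: t) = [] :: splitRec ['\n', '\n'] t := by
  rw [splitRec]
  rw [if_pos ⟨by simp [List.isPrefixOf], by simp⟩]
  simp

theorem splitRec_nn_cons_ne (c : Char) (t : List Char)
    (h : (['\n', '\n'].isPrefixOf (c :: t)) ≠ true) :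
    splitRec ['\n', '\n'] (c :: t) = (splitRec ['\n', '\n'] t).modifyHead (c :: ·) := by
  rw [splitRec]
  rw [if_neg (by rintro ⟨hp, -⟩; exact h hp)]

-- the single line split is the paragraph splits joined with one empty line in between
theorem splitRec_n_eq_joinLines (l : List Char) :
    splitRec ['\n'] l = joinLines (splitRec ['\n', '\n'] l) := by
  have H : ∀ (m : Nat) (l : List Char), l.length ≤ m →
      splitRec ['\n'] l = joinLines (splitRec ['\n', '\n'] l) := by
    intro m
    induction m with
    | zero =>
      intro l hl
      have : l = [] := by
        cases l with
        | nil => rfl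
        | cons a b => simp at hl
      subst this
      simp [splitRec_nil_eq, joinLines]
    | succ m ih =>
      intro l hl
      cases l with
      | nil => simp [splitRec_nil_eq, joinLines]
      | cons c t =>
        by_cases hnn : (['\n', '\n'].isPrefixOf (c :: t)) = true
        · -- l starts with "\n\n"
          rcases t with _ | ⟨d, t2⟩
          · simp [List.isPrefixOf] at hnn
          · have hc : '\n' = c ∧ '\n' = d := by
              simpa [List.isPrefixOf] using hnn
            obtain ⟨rfl, rfl⟩ := hc
            rw [splitRec_nn_cons_nn]
            rw [splitRec_n_cons_n, splitRec_n_cons_n]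
            have ih2 := ih t2 (by simp at hl; omega)
            rcases h : splitRec ['\n', '\n'] t2 with _ | ⟨a, r⟩
            · exact absurd h (splitRec_ne_nil _ _)
            · rw [h] at ih2
              simp [joinLines, splitRec_nil_eq, ih2]
        · -- no paragraph break at the head
          rw [splitRec_nn_cons_ne c t hnn]
          have iht := ih t (by simp at hl; omega)
          rcases h : splitRec ['\n', '\n'] t with _ | ⟨a, r⟩
          · exact absurd h (splitRec_ne_nil _ _)
          · rw [h] at iht
            by_cases hc : c = '\n'
            · subst hc
              rw [splitRec_n_cons_n, iht]
              rcases r with _ | ⟨r1, r2⟩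
              · simp only [joinLines, List.modifyHead]
                rw [splitRec_n_cons_n]
              · simp only [joinLines, List.modifyHead]
                rw [splitRec_n_cons_n]
                simp
            · rw [splitRec_n_cons_ne c t hc, iht]
              rcases r with _ | ⟨r1, r2⟩
              · simp only [joinLines, List.modifyHead]
                rw [splitRec_n_cons_ne c a hc]
                rcases splitRec ['\n'] a with _ | ⟨a1, ar⟩ <;> rfl
              · simp only [joinLines, List.modifyHead]
                rw [splitRec_n_cons_ne c a hc]
                rcases hsa : splitRec ['\n'] a with _ | ⟨a1, ar⟩
                · exact absurd hsa (splitRec_ne_nil _ _)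
                · simp
  exact H l.length l le_rfl

-- strip each piece, keep the nonempty results
def pvKeep (p : List Char) : Option (List Char) :=
  if PySem.Chars.strip p = [] then none else some (PySem.Chars.strip p)

-- same, producing a String
def pvKeepS (p : List Char) : Option String := (pvKeep p).map String.ofList

theorem filterMap_joinLines (L : List (List Char)) :
    (joinLines L).filterMap pvKeep
      = L.flatMap (fun x => (splitRec ['\n'] x).filterMap pvKeep) := by
  fun_induction joinLines L with
  | case1 => simp
  | case2 x => simp
  | case3 x y r ih =>
    simp [List.filterMap_append, List.flatMap_cons,
      show pvKeep [] = none by decide, ih]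

-- Python-level piece: strip each piece, keep the nonempty results (String side)
def pvF (p : String) : Option String :=
  if PySem.Str.strip p = "" then none else some (PySem.Str.strip p)

theorem filter_map_eq_filterMap_pvF (X : List String) :
    (X.filter (fun p => PySem.Str.strip p ≠ "")).map PySem.Str.strip = X.filterMap pvF := by
  induction X with
  | nil => simp
  | cons a t ih =>
    by_cases h : PySem.Str.strip a = "" <;> simpa [pvF, h] using ih

theorem pySplitStr_eq (s sep : String) (h : sep.toList ≠ []) :
    pySplitStr s sep = (splitRec sep.toList s.toList).map String.ofList := by
  unfold pySplitStr
  rw [splitOn_eq_splitRec _ _ h]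

theorem lines_filterMap (s : String) :
    (pySplitStr s "\n").filterMap pvF
      = ((splitRec ['\n'] s.toList).filterMap pvKeep).map String.ofList := by
  rw [pySplitStr_eq s "\n" (by decide), List.filterMap_map, List.map_filterMap]
  congr 1
  funext p
  by_cases h : PySem.Chars.strip p = [] <;>
    simp [pvF, pvKeep, Function.comp, PySem.Str.strip, h, String.ofList_eq_empty_iff]

-- A's nested split reduces to the single line split, stripped and filtered
theorem pv_core_A (s2 : String) :
    ((pySplitStr s2 "\n\n").foldl
        (fun acc chunk =>
          acc ++ ((pySplitStr chunk "\n").filter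
                    (fun p => PySem.Str.strip p ≠ "")).map PySem.Str.strip) []).filter
      (fun p => p ≠ "")
    = ((splitRec ['\n'] s2.toList).filterMap pvKeep).map String.ofList := by
  rw [PySem.List.foldl_append_eq_flatMap]
  simp only [List.nil_append, filter_map_eq_filterMap_pvF, lines_filterMap]
  rw [pySplitStr_eq s2 "\n\n" (by decide), List.flatMap_map]
  simp only [String.toList_ofList]
  rw [← List.map_flatMap, ← filterMap_joinLines]
  simp only [show "\n\n".toList = ['\n', '\n'] from by decide]
  rw [← splitRec_n_eq_joinLines]
  rw [List.filter_eq_self.mpr]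
  intro b hb
  simp only [List.mem_map, List.mem_filterMap] at hb
  obtain ⟨x, ⟨a, _, hk⟩, rfl⟩ := hb
  unfold pvKeep at hk
  by_cases h : PySem.Chars.strip a = []
  · simp [h] at hk
  · rw [if_neg h] at hk
    obtain rfl : PySem.Chars.strip a = x := by injection hk
    simpa [String.ofList_eq_empty_iff] using h

-- B's scan equals the line split, stripped and filtered
theorem pvScan_eq (l : List Char) :
    ∀ (cur : List Char) (out : List String),
      pvScan l cur out = out ++ ((splitRec ['\n'] l).modifyHead (cur ++ ·)).filterMap pvKeepS := by
  induction l with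
  | nil =>
    intro cur out
    simp only [pvScan, splitRec_nil_eq, List.modifyHead, List.filterMap, pvKeepS, pvKeep,
      List.append_nil]
    by_cases h : PySem.Chars.strip cur = [] <;> simp [h]
  | cons c t ih =>
    intro cur out
    by_cases hc : c = '\n'
    · subst hc
      rw [show pvScan ('\n' :: t) cur out
            = pvScan t []
                (if PySem.Chars.strip cur = [] then out
                 else out ++ [String.ofList (PySem.Chars.strip cur)]) from rfl]
      rw [ih, splitRec_n_cons_n]
      rcases h : splitRec ['\n'] t with _ | ⟨a, r⟩
      · exact absurd h (splitRec_ne_nil _ _)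
      · simp only [List.modifyHead, List.nil_append, List.filterMap_cons]
        by_cases hcur : PySem.Chars.strip cur = []
        · simp [pvKeepS, pvKeep, hcur]
        · simp [pvKeepS, pvKeep, hcur]
    · rw [show pvScan (c :: t) cur out = pvScan t (cur ++ [c]) out from by
        simp [pvScan, hc]]
      rw [ih, splitRec_n_cons_ne c t hc]
      rcases h : splitRec ['\n'] t with _ | ⟨a, r⟩
      · exact absurd h (splitRec_ne_nil _ _)
      · simp

-- ===== VERDICT (by name: the statement is the Claim_ definition above) =====
theorem split_multi_text_py_spec : Claim_equal_split_multi_text_py := by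
  intro cell_value _
  unfold Spec_split_multi_text_py split_multi_text_py split_multi_text_py_alt
  simp only []
  split_ifs with h
  · rfl
  · rw [pv_core_A, pvScan_eq]
    simp only [List.nil_append]
    rcases hs : splitRec ['\n'] _ with _ | ⟨a, r⟩
    · exact absurd hs (splitRec_ne_nil _ _)
    · simp only [List.modifyHead, List.filterMap_cons, List.filterMap, pvKeepS]
      rcases pvKeep a with _ | v <;>
        simp [List.map_filterMap, Option.map]
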